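-- pv_equiv track=rewrite | github.com/nyucel/blm2010 | vize/180401026.py | xiyitoplamlari
-- ===== SOURCE A (Python) =====
-- def xiyitoplamlari(list, n):
--     xiyidegerleri = []
--     for i in range(7):
--         xiyi = 0
--         for k in range(n):
--             xiyi += ((k+1)**i)*(list[k])
--         xiyidegerleri.append(xiyi)
--     return xiyidegerleri
-- ===== SOURCE B (Python) =====
-- def xiyitoplamlari(list, n):
--     # single pass: read each element once, keep all seven accumulators together
--     sums = [0] * 7
--     for k in range(n):
--         x = list[k]
--         p = 1
--         new = []
--         for s in sums:
--             new.append(s + p * x)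
--             p *= k + 1
--         sums = new
--     return sums
-- ===== Notes on version B (the rewrite author's own statement) =====
-- stated objective: alternative
-- what changed: Replaced A's seven separate scans of the list (one per power) by a single pass that reads each element once and updates all seven accumulators together with an incrementally maintained running power.
import Mathlib
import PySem

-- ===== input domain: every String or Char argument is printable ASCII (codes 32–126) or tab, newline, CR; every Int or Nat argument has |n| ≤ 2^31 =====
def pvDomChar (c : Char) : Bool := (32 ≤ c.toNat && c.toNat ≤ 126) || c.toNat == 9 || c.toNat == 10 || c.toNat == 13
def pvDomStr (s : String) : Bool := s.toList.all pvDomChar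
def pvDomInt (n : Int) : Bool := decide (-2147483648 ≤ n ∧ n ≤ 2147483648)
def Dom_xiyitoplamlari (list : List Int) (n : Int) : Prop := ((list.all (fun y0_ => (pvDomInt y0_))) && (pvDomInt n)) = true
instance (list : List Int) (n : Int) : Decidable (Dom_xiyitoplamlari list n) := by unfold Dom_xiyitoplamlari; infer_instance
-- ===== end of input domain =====

-- ===== PORT A =====
-- B replaces A's seven separate scans by one pass keeping all seven accumulators (return value equal; alternative decomposition).
def xiyitoplamlari (list : List Int) (n : Int) : List Int :=
  (PySem.List.pyRange 0 7 1).foldl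
    (fun xiyidegerleri i =>
      xiyidegerleri ++
        [(PySem.List.pyRange 0 n 1).foldl
          (fun xiyi k => xiyi + (k + 1) ^ i.toNat * PySem.List.pyGetD list k 0) 0])
    []

-- ===== PORT B =====
def xiyitoplamlari_alt (list : List Int) (n : Int) : List Int :=
  (PySem.List.pyRange 0 n 1).foldl
    (fun sums k =>
      let x := PySem.List.pyGetD list k 0
      (sums.foldl (fun (st : List Int × Int) s => (st.1 ++ [s + st.2 * x], st.2 * (k + 1)))
        ([], 1)).1)
    (List.replicate 7 0)

-- ===== PRECONDITION & SPEC =====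
-- Pre_: A raises IndexError when n exceeds the list length; those inputs are excluded.
def Pre_xiyitoplamlari (list : List Int) (n : Int) : Prop := n ≤ (list.length : Int)
instance (list : List Int) (n : Int) : Decidable (Pre_xiyitoplamlari list n) := by unfold Pre_xiyitoplamlari; infer_instance
def pvWitness_xiyitoplamlari : List Int × Int := ([3, -1, 4], 3)
def Spec_xiyitoplamlari (list : List Int) (n : Int) (out : List Int) : Prop := out = xiyitoplamlari_alt list n
instance (list : List Int) (n : Int) (out : List Int) : Decidable (Spec_xiyitoplamlari list n out) := by unfold Spec_xiyitoplamlari; infer_instance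

-- ===== CLAIM (what is proved, stated in full; the proofs are below) =====
def Claim_equal_xiyitoplamlari : Prop := ∀ (list : List Int) (n : Int), Dom_xiyitoplamlari list n → Pre_xiyitoplamlari list n → Spec_xiyitoplamlari list n (xiyitoplamlari list n)

-- ===== LEMMAS AND PROOFS =====

-- the i-th power-weighted sum over the first n positions
def pvS (list : List Int) (i : Int) (n : Int) : Int :=
  (PySem.List.pyRange 0 n 1).foldl
    (fun xiyi k => xiyi + (k + 1) ^ i.toNat * PySem.List.pyGetD list k 0) 0

theorem pvA_eq (list : List Int) (n : Int) :
    xiyitoplamlari list n = (PySem.List.pyRange 0 7 1).map (fun i => pvS list i n) := by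
  simpa [xiyitoplamlari, pvS] using
    (PySem.List.foldl_append_singleton_eq_map (fun i => pvS list i n)
      (PySem.List.pyRange 0 7 1) [])

theorem pvS_succ (list : List Int) (i : Int) (m : Int) (hm : 0 ≤ m) :
    pvS list i (m + 1) = pvS list i m + (m + 1) ^ i.toNat * PySem.List.pyGetD list m 0 := by
  unfold pvS
  rw [PySem.List.pyRange_one_succ_right hm]
  simp

theorem pvB_eq (list : List Int) (n : Int) :
    xiyitoplamlari_alt list n = (PySem.List.pyRange 0 7 1).map (fun i => pvS list i n) := by
  by_cases hn : n ≤ 0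
  · unfold xiyitoplamlari_alt pvS
    rw [PySem.List.pyRange_one_eq_nil hn]
    simp [pvS, PySem.List.pyRange_one_eq_nil hn]
  · have h : ∀ m : Int, 0 ≤ m →
        (PySem.List.pyRange 0 m 1).foldl
          (fun sums k =>
            let x := PySem.List.pyGetD list k 0
            (sums.foldl (fun (st : List Int × Int) s => (st.1 ++ [s + st.2 * x], st.2 * (k + 1)))
              ([], 1)).1)
          (List.replicate 7 0)
        = (PySem.List.pyRange 0 7 1).map (fun i => pvS list i m) := by
      intro m hm
      induction m, hm using Int.le_induction with
      | base =>
        rw [PySem.List.pyRange_one_eq_nil (le_refl 0)]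
        simp [pvS, PySem.List.pyRange_one_eq_nil (le_refl 0)]
      | succ m hm ih =>
        rw [PySem.List.pyRange_one_succ_right hm, List.foldl_append, ih]
        have hr : PySem.List.pyRange 0 7 = [0, 1, 2, 3, 4, 5, 6] := by decide
        have hs : ∀ i : Int, pvS list i (m + 1)
            = pvS list i m + (m + 1) ^ i.toNat * PySem.List.pyGetD list m 0 :=
          fun i => pvS_succ list i m hm
        have h0 : Int.toNat 0 = 0 := rfl
        have h1 : Int.toNat 1 = 1 := rfl
        have h2 : Int.toNat 2 = 2 := rfl
        have h3 : Int.toNat 3 = 3 := rfl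
        have h4 : Int.toNat 4 = 4 := rfl
        have h5 : Int.toNat 5 = 5 := rfl
        have h6 : Int.toNat 6 = 6 := rfl
        simp only [hr, List.map, List.foldl, hs, List.nil_append, List.singleton_append,
          List.cons_append, List.cons.injEq, and_true, h0, h1, h2, h3, h4, h5, h6]
        and_intros <;> ring
    exact h n (by omega)

-- ===== VERDICT (by name: the statement is the Claim_ definition above) =====
theorem xiyitoplamlari_spec : Claim_equal_xiyitoplamlari := by
  intro list n _ _
  unfold Spec_xiyitoplamlari
  rw [pvA_eq, pvB_eq]
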